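-- pv_equiv track=rewrite | github.com/adityajs0204/OOPSPay | ml-service/models/fraud_detector.py | _check_group_fraud
-- ===== SOURCE A (Python) =====
-- def _check_group_fraud(zone_claims: list | None) -> str | None:
--     """
--     Flag if multiple claims originate from the same zone in a short
--     time window. zone_claims is a list of epoch timestamps.
--     """
--     if not zone_claims or len(zone_claims) < 3:
--         return None
--
--     sorted_ts = sorted(zone_claims)
--     # Check if 3+ claims within a 1-hour window
--     for i in range(len(sorted_ts) - 2):
--         window = sorted_ts[i + 2] - sorted_ts[i]
--         if window <= 3600:  # 1 hour in seconds
--             return (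
--                 f"Group fraud risk: {len(zone_claims)} claims from same zone, "
--                 f"3+ within 1-hour window"
--             )
--     return None
-- ===== SOURCE B (Python) =====
-- def _check_group_fraud(zone_claims):
--     if not zone_claims or len(zone_claims) < 3:
--         return None
--     sorted_ts = sorted(zone_claims)
--     left = 0
--     for right in range(len(sorted_ts)):
--         while sorted_ts[right] - sorted_ts[left] > 3600:
--             left += 1
--         if right - left + 1 >= 3:
--             return (
--                 f"Group fraud risk: {len(zone_claims)} claims from same zone, "
--                 f"3+ within 1-hour window"
--             )
--     return None
-- ===== Notes on version B (the rewrite author's own statement) =====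
-- stated objective: alternative
-- what changed: Replaces A's fixed-offset probe (testing sorted_ts[i+2]-sorted_ts[i] for each i) with a two-pointer sliding window that advances a left boundary while the window exceeds one hour and flags when the window size reaches 3.
import Mathlib
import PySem

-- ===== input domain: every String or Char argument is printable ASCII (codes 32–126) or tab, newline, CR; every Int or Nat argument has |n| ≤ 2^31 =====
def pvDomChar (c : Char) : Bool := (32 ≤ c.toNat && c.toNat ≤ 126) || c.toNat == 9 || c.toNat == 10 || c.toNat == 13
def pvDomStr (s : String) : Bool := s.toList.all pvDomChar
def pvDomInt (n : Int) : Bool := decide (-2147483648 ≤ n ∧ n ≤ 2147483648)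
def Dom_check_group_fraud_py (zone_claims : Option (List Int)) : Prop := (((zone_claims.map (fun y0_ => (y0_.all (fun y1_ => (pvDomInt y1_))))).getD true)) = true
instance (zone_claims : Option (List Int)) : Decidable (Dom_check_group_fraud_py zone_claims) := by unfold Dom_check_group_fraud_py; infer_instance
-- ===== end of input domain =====

-- B replaces A's fixed i..i+2 probe with a two-pointer sliding window over the sorted list (alternative decomposition, same cost).


-- ===== PORT A =====
-- 'for i in range(len(sorted_ts) - 2): …' with early return
def pvALoop (s : List Int) (msg : String) : List Int → Option String
  | [] => none
  | i :: rest =>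
      if PySem.List.pyGetD s (i + 2) 0 - PySem.List.pyGetD s i 0 ≤ 3600 then some msg
      else pvALoop s msg rest

def check_group_fraud_py (zone_claims : Option (List Int)) : Option String :=
  match zone_claims with
  | none => none
  | some zs =>
      if zs.length = 0 ∨ (zs.length : Int) < 3 then none
      else
        let sorted_ts := PySem.List.sorted zs (fun x => x) false
        pvALoop sorted_ts
          ("Group fraud risk: " ++ PySem.Int.toStr (zs.length : Int) ++ " claims from same zone, 3+ within 1-hour window")
          (PySem.List.pyRange 0 ((sorted_ts.length : Int) - 2) 1)

-- ===== PORT B =====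
-- 'while sorted_ts[right] - sorted_ts[left] > 3600: left += 1' (fuel right-left suffices: the
-- difference at left = right is 0, so Python's loop never advances left past right)
def pvBAdvance (s : List Int) (r : Int) : Nat → Int → Int
  | 0, left => left
  | fuel + 1, left =>
      if PySem.List.pyGetD s r 0 - PySem.List.pyGetD s left 0 > 3600 then
        pvBAdvance s r fuel (left + 1)
      else left

-- 'for right in range(len(sorted_ts)): …' carrying the moving left pointer
def pvBLoop (s : List Int) (msg : String) : List Int → Int → Option String
  | [], _ => none
  | r :: rest, left =>
      let left' := pvBAdvance s r (r - left).toNat left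
      if r - left' + 1 ≥ 3 then some msg
      else pvBLoop s msg rest left'

def check_group_fraud_py_alt (zone_claims : Option (List Int)) : Option String :=
  match zone_claims with
  | none => none
  | some zs =>
      if zs.length = 0 ∨ (zs.length : Int) < 3 then none
      else
        let sorted_ts := PySem.List.sorted zs (fun x => x) false
        pvBLoop sorted_ts
          ("Group fraud risk: " ++ PySem.Int.toStr (zs.length : Int) ++ " claims from same zone, 3+ within 1-hour window")
          (PySem.List.pyRange 0 (sorted_ts.length : Int) 1) 0

-- ===== PRECONDITION & SPEC =====
def Spec_check_group_fraud_py (zone_claims : Option (List Int)) (out : Option String) : Prop := out = check_group_fraud_py_alt zone_claims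
instance (zone_claims : Option (List Int)) (out : Option String) : Decidable (Spec_check_group_fraud_py zone_claims out) := by unfold Spec_check_group_fraud_py; infer_instance

-- ===== CLAIM (what is proved, stated in full; the proofs are below) =====
def Claim_equal_check_group_fraud_py : Prop := ∀ (zone_claims : Option (List Int)), Dom_check_group_fraud_py zone_claims → Spec_check_group_fraud_py zone_claims (check_group_fraud_py zone_claims)

-- ===== LEMMAS AND PROOFS =====

-- the common normal form both loops are reduced to: "some index i < n2 opens a ≤ 3600 window"
theorem pvAny_iff (s : List Int) (n2 : Int) :
    ((PySem.List.pyRange 0 n2 1).any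
        (fun i => PySem.List.pyGetD s (i + 2) 0 - PySem.List.pyGetD s i 0 ≤ 3600)) = true ↔
      ∃ i : Int, 0 ≤ i ∧ i < n2 ∧
        PySem.List.pyGetD s (i + 2) 0 - PySem.List.pyGetD s i 0 ≤ 3600 := by
  simp [List.any_eq_true, PySem.List.mem_pyRange_one, and_assoc]

-- A's loop returns msg iff some index in the iterated list hits the window condition
theorem pvALoop_eq (s : List Int) (msg : String) (l : List Int) :
    pvALoop s msg l =
      if l.any (fun i => PySem.List.pyGetD s (i + 2) 0 - PySem.List.pyGetD s i 0 ≤ 3600) then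
        some msg
      else none := by
  induction l with
  | nil => simp [pvALoop]
  | cons i rest ih =>
      by_cases h : PySem.List.pyGetD s (i + 2) 0 - PySem.List.pyGetD s i 0 ≤ 3600
      · rw [pvALoop, if_pos h, if_pos (by simp [List.any_cons]; exact Or.inl (by omega))]
      · have hcons : ((i :: rest).any
            (fun j => PySem.List.pyGetD s (j + 2) 0 - PySem.List.pyGetD s j 0 ≤ 3600)) =
            rest.any (fun j => PySem.List.pyGetD s (j + 2) 0 - PySem.List.pyGetD s j 0 ≤ 3600) := by
          simp [List.any_cons]
          intro hc
          exact absurd (show PySem.List.pyGetD s (i + 2) 0 - PySem.List.pyGetD s i 0 ≤ 3600 by omega) h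
        rw [pvALoop, if_neg h, ih, hcons]

-- characterisation of the while-loop: it stops at the first left with s[r]-s[left] ≤ 3600
theorem pvBAdvance_spec (s : List Int) (r : Int) (fuel : Nat) (left : Int)
    (hle : left + fuel = r) :
    left ≤ pvBAdvance s r fuel left ∧ pvBAdvance s r fuel left ≤ r ∧
    PySem.List.pyGetD s r 0 - PySem.List.pyGetD s (pvBAdvance s r fuel left) 0 ≤ 3600 ∧
    ∀ l, left ≤ l → l < pvBAdvance s r fuel left →
      PySem.List.pyGetD s r 0 - PySem.List.pyGetD s l 0 > 3600 := by
  induction fuel generalizing left with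
  | zero =>
      have : left = r := by omega
      subst this
      simp [pvBAdvance]
      omega
  | succ fuel ih =>
      by_cases h : PySem.List.pyGetD s r 0 - PySem.List.pyGetD s left 0 > 3600
      · have hrec := ih (left + 1) (by omega)
        simp only [pvBAdvance, if_pos h]
        refine ⟨by omega, hrec.2.1, hrec.2.2.1, ?_⟩
        intro l hl1 hl2
        rcases eq_or_lt_of_le hl1 with rfl | hlt
        · exact h
        · exact hrec.2.2.2 l (by omega) hl2
      · simp only [pvBAdvance, if_neg h]
        refine ⟨le_refl _, by omega, by omega, ?_⟩
        intro l hl1 hl2; omega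

-- B's outer loop, with the sliding-window invariant, computes A's "first hit" answer
theorem pvBLoop_eq (s : List Int) (msg : String)
    (hmono : ∀ i j : Int, 0 ≤ i → i ≤ j → j < (s.length : Int) →
        PySem.List.pyGetD s i 0 ≤ PySem.List.pyGetD s j 0)
    (r : Int) (hr0 : 0 ≤ r) (hrn : r ≤ (s.length : Int))
    (left : Int) (hl0 : 0 ≤ left) (hlr : left ≤ r)
    (hinv2 : ∀ i : Int, 0 ≤ i → i + 2 < r →
        PySem.List.pyGetD s (i + 2) 0 - PySem.List.pyGetD s i 0 > 3600)
    (hinv3 : ∀ l : Int, 0 ≤ l → l < left →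
        PySem.List.pyGetD s (r - 1) 0 - PySem.List.pyGetD s l 0 > 3600) :
    pvBLoop s msg (PySem.List.pyRange r (s.length : Int) 1) left =
      if (PySem.List.pyRange 0 ((s.length : Int) - 2) 1).any
          (fun i => PySem.List.pyGetD s (i + 2) 0 - PySem.List.pyGetD s i 0 ≤ 3600) then
        some msg
      else none := by
  by_cases hend : (s.length : Int) ≤ r
  · rw [PySem.List.pyRange_one_eq_nil hend]
    rw [pvBLoop, if_neg]
    simp only [pvAny_iff]
    rintro ⟨i, hi0, hin, hc⟩
    exact absurd hc (by have := hinv2 i hi0 (by omega); omega)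
  · rw [not_le] at hend
    rw [PySem.List.pyRange_one_cons hend]
    rw [pvBLoop]
    have hadv := pvBAdvance_spec s r (r - left).toNat left (by omega)
    set left' := pvBAdvance s r (r - left).toNat left with hL
    obtain ⟨ha1, ha2, ha3, ha4⟩ := hadv
    by_cases hwin : r - left' + 1 ≥ 3
    · rw [if_pos hwin, if_pos]
      rw [pvAny_iff]
      refine ⟨r - 2, by omega, by omega, ?_⟩
      have h1 : PySem.List.pyGetD s left' 0 ≤ PySem.List.pyGetD s (r - 2) 0 :=
        hmono left' (r - 2) (by omega) (by omega) (by omega)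
      have h2 : r - 2 + 2 = r := by omega
      rw [h2]; omega
    · rw [if_neg hwin]
      -- the invariant carried to r + 1: every l below the new left misses even the new right end
      have hstep : ∀ l : Int, 0 ≤ l → l < left' →
          PySem.List.pyGetD s r 0 - PySem.List.pyGetD s l 0 > 3600 := by
        intro l hl1 hl2
        by_cases hcase : l < left
        · have h3 := hinv3 l hl1 hcase
          have hmle : PySem.List.pyGetD s (r - 1) 0 ≤ PySem.List.pyGetD s r 0 :=
            hmono (r - 1) r (by omega) (by omega) (by omega)
          omega
        · exact ha4 l (by omega) hl2
      rw [pvBLoop_eq s msg hmono (r + 1) (by omega) (by omega) left' (by omega) (by omega)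
        ?_ ?_]
      · intro i hi1 hi2
        by_cases hlt : i + 2 < r
        · exact hinv2 i hi1 hlt
        · have hieq : i = r - 2 := by omega
          subst hieq
          have hrw : r - 2 + 2 = r := by omega
          rw [hrw]
          exact hstep (r - 2) hi1 (by omega)
      · intro l hl1 hl2
        have hrw : r + 1 - 1 = r := by omega
        rw [hrw]
        exact hstep l hl1 hl2
  termination_by ((s.length : Int) - r).toNat
  decreasing_by omega

-- the sorted list is pointwise monotone under pyGetD
theorem pv_sorted_mono (zs : List Int) :
    ∀ i j : Int, 0 ≤ i → i ≤ j → j < ((PySem.List.sorted zs (fun x => x) false).length : Int) →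
      PySem.List.pyGetD (PySem.List.sorted zs (fun x => x) false) i 0 ≤
      PySem.List.pyGetD (PySem.List.sorted zs (fun x => x) false) j 0 := by
  intro i j hi hij hj
  rw [PySem.List.pyGetD_eq_getElem _ 0 hi (by omega),
      PySem.List.pyGetD_eq_getElem _ 0 (by omega) hj]
  exact PySem.List.sorted_id_getElem_mono zs (by omega) (by omega)

-- ===== VERDICT (by name: the statement is the Claim_ definition above) =====
theorem check_group_fraud_py_spec : Claim_equal_check_group_fraud_py := by
  intro zone_claims _
  unfold Spec_check_group_fraud_py
  match zone_claims with
  | none => rfl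
  | some zs =>
      simp only [check_group_fraud_py, check_group_fraud_py_alt]
      by_cases hg : zs.length = 0 ∨ (zs.length : Int) < 3
      · rw [if_pos hg, if_pos hg]
      · rw [if_neg hg, if_neg hg]
        rw [pvALoop_eq,
            pvBLoop_eq _ _ (pv_sorted_mono zs) 0 (by omega) (by omega)
              0 le_rfl le_rfl
              (fun i hi1 hi2 => absurd hi2 (by omega))
              (fun l hl1 hl2 => absurd hl2 (by omega))]
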